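-- pv_equiv track=rewrite | github.com/arouax/wordpatterns | patterns/processors.py | skeletonize
-- ===== SOURCE A (Python) =====
-- alphabet = 'abcdefghijklmnopqrstuvwxyzABCDEFGHIJKLMNOPQRSTUVWXYZ'
--
-- def skeletonize(word):
--     """
--     Creates a skeleton of a given word: "dad" becomes "aba", "molecula" becomes
--     "abcdefbg", "abba" stays "abba".
--     """
--     if not isinstance(word, str):
--         return False
--     worddict = {}
--     n = 0
--     skeleton = ''
--     for letter in word.lower():
--         if letter not in worddict:
--             worddict[letter] = alphabet[n]
--             n += 1
--         skeleton += worddict[letter]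
--     return skeleton
-- ===== SOURCE B (Python) =====
-- alphabet = 'abcdefghijklmnopqrstuvwxyzABCDEFGHIJKLMNOPQRSTUVWXYZ'
--
-- def skeletonize(word):
--     if not isinstance(word, str):
--         return False
--     low = word.lower()
--     # rank of a letter = number of distinct letters occurring strictly before
--     # its first occurrence; no dict is built, the rank is recomputed per letter.
--     return ''.join(alphabet[len(set(low[:low.index(c)]))] for c in low)
-- ===== Notes on version B (the rewrite author's own statement) =====
-- stated objective: alternative
-- what changed: A incrementally builds a letter-to-code dict while concatenating the output in one stateful pass; B builds no table at all and computes each letter's code directly as alphabet[len(set(prefix of the lowered word before that letter's first occurrence))], a rank-by-first-occurrence formula.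
import Mathlib
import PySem

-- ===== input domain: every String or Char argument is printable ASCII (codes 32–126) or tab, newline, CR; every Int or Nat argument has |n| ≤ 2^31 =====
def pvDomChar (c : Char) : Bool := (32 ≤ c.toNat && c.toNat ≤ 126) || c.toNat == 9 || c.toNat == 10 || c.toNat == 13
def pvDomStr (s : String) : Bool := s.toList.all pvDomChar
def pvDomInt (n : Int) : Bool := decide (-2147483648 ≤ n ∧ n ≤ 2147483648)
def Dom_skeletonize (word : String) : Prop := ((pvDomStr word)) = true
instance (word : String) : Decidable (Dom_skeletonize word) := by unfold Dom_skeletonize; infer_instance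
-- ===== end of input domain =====

-- B drops A's incrementally-built letter→code dict: each letter's code is computed directly
-- as alphabet[#distinct letters before its first occurrence] (alternative algorithm, not faster).
-- (The Lean signature fixes word : String, so A's non-str guard returning False is unreachable here.)

def pvAlph : List Char := "abcdefghijklmnopqrstuvwxyzABCDEFGHIJKLMNOPQRSTUVWXYZ".toList

-- ===== PORT A =====
-- assoc-list lookup, first match (A's dict lookup)
def pvFind : List (Char × Char) → Char → Option Char
  | [], _ => none
  | (k, v) :: rest, c => if k = c then some v else pvFind rest c

-- A's loop state: worddict, n, skeleton; alphabet[n] ported as getD (Pre_ keeps n in range)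
def pvLoopA : List Char → List (Char × Char) → Nat → List Char → List Char
  | [], _, _, sk => sk
  | c :: rest, d, n, sk =>
    match pvFind d c with
    | some v => pvLoopA rest d n (sk ++ [v])
    | none => pvLoopA rest (d ++ [(c, pvAlph.getD n ' ')]) (n + 1) (sk ++ [pvAlph.getD n ' '])

def skeletonize (word : String) : String :=
  String.ofList (pvLoopA (PySem.Str.lower word).toList [] 0 [])

-- ===== PORT B =====
-- low.index(c) with c ∈ low is the first index (List.idxOf); low[:k] with 0 ≤ k is List.take;
-- alphabet[rank] ported as getD (rank < #distinct ≤ 52 under Pre_). Exact on those inputs.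
def skeletonize_alt (word : String) : String :=
  let low := (PySem.Str.lower word).toList
  String.ofList (low.map (fun c =>
    pvAlph.getD (PySem.Set.ofList (low.take (low.idxOf c))).length ' '))

-- ===== PRECONDITION & SPEC =====
-- Pre_ excludes exactly the inputs with more than 52 distinct letters in word.lower(),
-- on which Python A raises IndexError (alphabet[n]); Python B raises the same way there.
def Pre_skeletonize (word : String) : Prop :=
  (PySem.Set.ofList (PySem.Str.lower word).toList).length ≤ 52
instance (word : String) : Decidable (Pre_skeletonize word) := by unfold Pre_skeletonize; infer_instance

def pvWitness_skeletonize : String := "Molecula"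

def Spec_skeletonize (word : String) (out : String) : Prop := out = skeletonize_alt word
instance (word : String) (out : String) : Decidable (Spec_skeletonize word out) := by unfold Spec_skeletonize; infer_instance

-- ===== CLAIM (what is proved, stated in full; the proofs are below) =====
def Claim_equal_skeletonize : Prop := ∀ (word : String), Dom_skeletonize word → Pre_skeletonize word → Spec_skeletonize word (skeletonize word)

-- ===== LEMMAS AND PROOFS =====

-- first-occurrence dedup used to describe A's dict keys
def pvDedup (ds : List Char) (p : List Char) : List Char :=
  p.foldl (fun acc c => if c ∈ acc then acc else acc ++ [c]) ds

-- A's dict keys are exactly Python set()-order distinct letters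
theorem pvDedup_eq_ofList (p : List Char) (ds : List Char) :
    pvDedup ds p = List.foldl PySem.Set.add ds p := by
  induction p generalizing ds with
  | nil => rfl
  | cons c rest ih =>
    show pvDedup (if c ∈ ds then ds else ds ++ [c]) rest = _
    rw [ih]
    simp [List.foldl, PySem.Set.add, PySem.Set.contains]

theorem pvFind_append_some {d e : List (Char × Char)} {c : Char} {v : Char}
    (h : pvFind d c = some v) : pvFind (d ++ e) c = some v := by
  induction d with
  | nil => simp [pvFind] at h
  | cons p rest ih =>
    obtain ⟨k, w⟩ := p
    by_cases hk : k = c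
    · simp [pvFind, hk] at h ⊢; simp_all
    · simp [pvFind, hk] at h ⊢; simp_all

theorem pvFind_append_none {d e : List (Char × Char)} {c : Char}
    (h : pvFind d c = none) : pvFind (d ++ e) c = pvFind e c := by
  induction d with
  | nil => simp
  | cons p rest ih =>
    obtain ⟨k, w⟩ := p
    by_cases hk : k = c
    · simp [pvFind, hk] at h
    · simp [pvFind, hk] at h ⊢; simp_all

-- the table {c_i ↦ alphabet[i]} over a list of distinct letters
def pvTableAux (i : Nat) : List Char → List (Char × Char)
  | [] => []
  | c :: rest => (c, pvAlph.getD i ' ') :: pvTableAux (i + 1) rest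

theorem pvTableAux_append (ds : List Char) (c : Char) (i : Nat) :
    pvTableAux i (ds ++ [c]) = pvTableAux i ds ++ [(c, pvAlph.getD (i + ds.length) ' ')] := by
  induction ds generalizing i with
  | nil => simp [pvTableAux]
  | cons a rest ih =>
    simp [pvTableAux, ih (i + 1)]
    ring_nf

theorem pvFind_table_none_iff (ds : List Char) (c : Char) (i : Nat) :
    pvFind (pvTableAux i ds) c = none ↔ c ∉ ds := by
  induction ds generalizing i with
  | nil => simp [pvTableAux, pvFind]
  | cons a rest ih =>
    by_cases ha : a = c
    · subst ha; simp [pvTableAux, pvFind]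
    · simp [pvTableAux, pvFind, ha, ih (i + 1), Ne.symm ha]

theorem pvFind_table_stable {ds : List Char} {c v : Char} {i : Nat} (p : List Char)
    (h : pvFind (pvTableAux i ds) c = some v) :
    pvFind (pvTableAux i (pvDedup ds p)) c = some v := by
  induction p generalizing ds with
  | nil => simpa [pvDedup]
  | cons a rest ih =>
    show pvFind (pvTableAux i (pvDedup (if a ∈ ds then ds else ds ++ [a]) rest)) c = some v
    by_cases ha : a ∈ ds
    · simpa [ha] using ih h
    · simp only [ha, if_false]
      exact ih (by rw [pvTableAux_append]; exact pvFind_append_some h)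

-- A's loop equals translating through the table of first-occurrence distinct letters
theorem pvLoopA_eq (p : List Char) : ∀ (ds : List Char) (sk : List Char),
    pvLoopA p (pvTableAux 0 ds) ds.length sk
      = sk ++ p.map (fun c => (pvFind (pvTableAux 0 (pvDedup ds p)) c).getD ' ') := by
  induction p with
  | nil => intro ds sk; simp [pvLoopA, pvDedup]
  | cons c rest ih =>
    intro ds sk
    have hded : pvDedup ds (c :: rest) = pvDedup (if c ∈ ds then ds else ds ++ [c]) rest := rfl
    cases h : pvFind (pvTableAux 0 ds) c with
    | some v =>
      have hmem : c ∈ ds := by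
        by_contra hn
        rw [← pvFind_table_none_iff ds c 0] at hn
        simp [hn] at h
      have hstab := pvFind_table_stable rest h
      rw [hded] ; simp only [hmem, if_true] at *
      simp [pvLoopA, h, ih ds (sk ++ [v]), hstab]
    | none =>
      have hmem : c ∉ ds := (pvFind_table_none_iff ds c 0).mp h
      have hins : pvTableAux 0 ds ++ [(c, pvAlph.getD ds.length ' ')] = pvTableAux 0 (ds ++ [c]) := by
        rw [pvTableAux_append]; simp
      have hself : pvFind (pvTableAux 0 (ds ++ [c])) c = some (pvAlph.getD ds.length ' ') := by
        rw [← hins, pvFind_append_none h]; simp [pvFind]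
      have hstab := pvFind_table_stable rest hself
      have hlen : ds.length + 1 = (ds ++ [c]).length := by simp
      rw [hded]; simp only [hmem, if_false]
      have hstep : pvLoopA (c :: rest) (pvTableAux 0 ds) ds.length sk
          = pvLoopA rest (pvTableAux 0 ds ++ [(c, pvAlph.getD ds.length ' ')]) (ds.length + 1)
              (sk ++ [pvAlph.getD ds.length ' ']) := by
        simp [pvLoopA, h]
      rw [hstep, hins, hlen, ih (ds ++ [c]) (sk ++ [pvAlph.getD ds.length ' '])]
      simp [hstab]

theorem pvDedup_prefix (p : List Char) (ds : List Char) :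
    ∃ e, pvDedup ds p = ds ++ e := by
  induction p generalizing ds with
  | nil => exact ⟨[], by simp [pvDedup]⟩
  | cons c rest ih =>
    show ∃ e, pvDedup (if c ∈ ds then ds else ds ++ [c]) rest = ds ++ e
    by_cases hc : c ∈ ds
    · simpa [hc] using ih ds
    · obtain ⟨e, he⟩ := ih (ds ++ [c])
      exact ⟨c :: e, by simp [hc, he]⟩

theorem pvDedup_nodup (p : List Char) (ds : List Char) (h : ds.Nodup) :
    (pvDedup ds p).Nodup := by
  induction p generalizing ds with
  | nil => exact h
  | cons c rest ih =>
    show (pvDedup (if c ∈ ds then ds else ds ++ [c]) rest).Nodup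
    by_cases hc : c ∈ ds
    · simpa [hc] using ih ds h
    · simp only [hc, if_false]
      refine ih (ds ++ [c]) ?_
      simp [List.nodup_append, h]
      intro a ha hac
      exact hc (hac ▸ ha)

theorem pvDedup_mem (p : List Char) (ds : List Char) (c : Char) :
    c ∈ pvDedup ds p ↔ c ∈ ds ∨ c ∈ p := by
  induction p generalizing ds with
  | nil => simp [pvDedup]
  | cons a rest ih =>
    show c ∈ pvDedup (if a ∈ ds then ds else ds ++ [a]) rest ↔ _
    by_cases ha : a ∈ ds
    · simp only [ha, if_true, ih]
      constructor
      · rintro (h | h) <;> simp_all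
      · rintro (h | h) <;> simp_all
        rcases h with h | h
        · subst h; exact Or.inl ha
        · exact Or.inr h
    · simp only [ha, if_false, ih]
      simp [List.mem_append, or_assoc]

-- looking up a letter in the table of a duplicate-free list gives its indexed code
theorem pvFind_table_idx (ds : List Char) (c : Char) (i : Nat)
    (hnd : ds.Nodup) (hc : c ∈ ds) :
    pvFind (pvTableAux i ds) c = some (pvAlph.getD (i + ds.idxOf c) ' ') := by
  induction ds generalizing i with
  | nil => simp at hc
  | cons a rest ih =>
    by_cases ha : a = c
    · subst ha; simp [pvTableAux, pvFind, List.idxOf_cons_self]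
    · have hcr : c ∈ rest := by rcases List.mem_cons.mp hc with h | h; exact absurd h.symm ha; exact h
      have : pvFind (pvTableAux (i + 1) rest) c
          = some (pvAlph.getD (i + 1 + rest.idxOf c) ' ') := ih (i + 1) (List.Nodup.of_cons hnd) hcr
      simp only [pvTableAux, pvFind, ha, if_false, this]
      have : i + 1 + rest.idxOf c = i + (a :: rest).idxOf c := by
        rw [List.idxOf_cons_ne _ (by exact fun h => ha h)]
        omega
      rw [this]

theorem pvIdxOf_append_cons (ds e : List Char) (c : Char) (h : c ∉ ds) :
    (ds ++ c :: e).idxOf c = ds.length := by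
  induction ds with
  | nil => simp
  | cons a r ih =>
    simp only [List.mem_cons, not_or] at h
    rw [List.cons_append, List.idxOf_cons_ne _ (Ne.symm h.1), ih h.2]
    simp

-- the index of a letter in the dedup of the whole word = size of the dedup of
-- the prefix before its first occurrence
theorem pvDedup_idxOf (low : List Char) (c : Char) (hc : c ∈ low) :
    ∀ (ds : List Char), c ∉ ds →
    (pvDedup ds low).idxOf c = (pvDedup ds (low.take (low.idxOf c))).length := by
  induction low with
  | nil => simp at hc
  | cons a rest ih =>
    intro ds hds
    by_cases ha : a = c
    · subst ha
      obtain ⟨e, he⟩ := pvDedup_prefix rest (ds ++ [a])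
      show (pvDedup (if a ∈ ds then ds else ds ++ [a]) rest).idxOf a
          = (pvDedup ds ((a :: rest).take ((a :: rest).idxOf a))).length
      simp only [hds, if_false, List.idxOf_cons_self, List.take_zero]
      rw [he, List.append_assoc, List.singleton_append, pvIdxOf_append_cons _ _ _ hds]
      rfl
    · have hcr : c ∈ rest := by rcases List.mem_cons.mp hc with h | h; exact absurd h.symm ha; exact h
      have hk : (a :: rest).idxOf c = rest.idxOf c + 1 :=
        List.idxOf_cons_ne _ (fun hh => ha hh)
      show (pvDedup (if a ∈ ds then ds else ds ++ [a]) rest).idxOf c = _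
      rw [hk]
      simp only [List.take_succ_cons]
      show _ = (pvDedup (if a ∈ ds then ds else ds ++ [a]) (rest.take (rest.idxOf c))).length
      by_cases hmem : a ∈ ds
      · simp only [hmem, if_true]
        exact ih hcr ds hds
      · simp only [hmem, if_false]
        exact ih hcr (ds ++ [a]) (by
          simp only [List.mem_append, List.mem_singleton, not_or]
          exact ⟨hds, fun hh => ha hh.symm⟩)

-- ===== VERDICT (by name: the statement is the Claim_ definition above) =====
set_option maxHeartbeats 1000000 in
theorem skeletonize_spec : Claim_equal_skeletonize := by
  intro word _ _
  show skeletonize word = skeletonize_alt word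
  unfold skeletonize skeletonize_alt
  have hA := pvLoopA_eq (PySem.Str.lower word).toList [] []
  simp only [pvTableAux, List.length_nil] at hA
  rw [hA]
  simp only [List.nil_append]
  congr 1
  apply List.map_congr_left
  intro c hc
  have hnd : (pvDedup [] (PySem.Str.lower word).toList).Nodup := pvDedup_nodup _ _ (by simp)
  have hmem : c ∈ pvDedup [] (PySem.Str.lower word).toList := (pvDedup_mem _ _ _).mpr (Or.inr hc)
  rw [pvFind_table_idx _ _ _ hnd hmem]
  simp only [Option.getD_some, Nat.zero_add]
  rw [pvDedup_idxOf _ _ hc [] (by simp), pvDedup_eq_ofList,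
    ← PySem.Set.ofList_eq_foldl]
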